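-- pv_equiv track=rewrite | github.com/pypi-data/pypi-mirror-334 | packages/resctk/resctk-0.1.0.tar.gz/resctk-0.1.0/resctk/resume.py | merge_repetitions
-- ===== SOURCE A (Python) =====
-- from copy import deepcopy
--
-- def merge_repetitions(parsed_resume: dict, section: str = None) -> dict:
--     new_parsed_data = deepcopy(parsed_resume)
--     merged_data = {}
--     keys_to_remove = set()
--
--     keys = new_parsed_data.keys()
--     if section:
--         # If section- only merge keys that start with the given section
--         relevant_keys = [key for key in keys if key.startswith(section)]
--     else:
--         # If no section- consider all keys for merging
--         relevant_keys = keys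
--
--     for key in relevant_keys:
--         for other_key in relevant_keys:
--             if key != other_key and key.startswith(other_key):
--                 merged_data.setdefault(other_key, []).extend(new_parsed_data[key])
--                 keys_to_remove.add(key)
--
--     for key, values in merged_data.items():
--         new_parsed_data[key] = "".join(values)
--
--     for key in keys_to_remove:
--         new_parsed_data.pop(key, None)
--
--     return new_parsed_data
-- ===== SOURCE B (Python) =====
-- def merge_repetitions(parsed_resume: dict, section: str = None) -> dict:
--     # One pass over the keys: for each key, look up its proper prefixes in a
--     # hash set instead of comparing it against every other key.
--     items = list(parsed_resume.items())
--     if section: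
--         relevant = [k for k, _ in items if k.startswith(section)]
--     else:
--         relevant = [k for k, _ in items]
--     keyset = set(relevant)
--     parts = {}
--     removed = set()
--     for k in relevant:
--         v = parsed_resume[k]
--         for i in range(len(k)):
--             p = k[:i]
--             if p in keyset:
--                 parts.setdefault(p, []).append(v)
--                 removed.add(k)
--     return {k: ("".join(parts[k]) if k in parts else v)
--             for k, v in items if k not in removed}
-- ===== Notes on version B (the rewrite author's own statement) =====
-- stated objective: faster
-- what changed: A compares every relevant key against every other relevant key (all pairs); B makes one pass over the keys and looks up each key's proper prefixes in a hash set, grouping merged values per prefix in a single dict pass.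
import Mathlib
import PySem

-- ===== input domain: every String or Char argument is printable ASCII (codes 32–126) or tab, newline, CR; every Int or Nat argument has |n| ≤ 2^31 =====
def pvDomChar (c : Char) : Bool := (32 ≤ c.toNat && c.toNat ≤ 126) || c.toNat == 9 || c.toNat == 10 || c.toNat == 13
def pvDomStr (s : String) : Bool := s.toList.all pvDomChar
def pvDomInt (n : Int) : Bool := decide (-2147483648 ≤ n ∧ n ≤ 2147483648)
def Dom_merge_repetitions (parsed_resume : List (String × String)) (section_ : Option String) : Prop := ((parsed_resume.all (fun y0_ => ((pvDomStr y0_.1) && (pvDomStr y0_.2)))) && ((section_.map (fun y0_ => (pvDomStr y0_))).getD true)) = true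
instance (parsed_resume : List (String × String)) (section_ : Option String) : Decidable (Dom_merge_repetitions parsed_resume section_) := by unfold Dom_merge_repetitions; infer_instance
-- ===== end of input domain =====

-- B replaces A's all-pairs key comparison by a single pass that looks up each key's
-- proper prefixes in a set; same result for every input.
-- The input dict is not mutated by either version (A deep-copies it first).

-- ===== PORT A =====
-- Python's `for key in keys_to_remove` iterates a set in hash order; the result
-- (a dict after pops) does not depend on that order, so we fold over the Set's list.
def merge_repetitions (parsed_resume : List (String × String)) (section_ : Option String) : List (String × String) :=
  let new_parsed : PySem.Dict String String := PySem.Dict.ofList parsed_resume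
  let keys := new_parsed.keys
  let relevant : List String :=
    match section_ with
    | some s => if s ≠ "" then keys.filter (fun k => PySem.Str.startswith k s) else keys
    | none => keys
  let st := relevant.foldl (fun (st : PySem.Dict String (List Char) × PySem.Set String) key =>
      relevant.foldl (fun st other =>
        if key ≠ other ∧ PySem.Str.startswith key other = true then
          (st.1.modify other [] (fun l => l ++ (new_parsed.getD key "").toList),
           PySem.Set.add st.2 key)
        else st) st)
    (PySem.Dict.empty, PySem.Set.empty)
  let d2 := st.1.items.foldl (fun d kv => d.insert kv.1 (String.ofList kv.2)) new_parsed
  let d3 := st.2.foldl (fun d k => d.erase k) d2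
  d3.items

-- ===== PORT B =====
def merge_repetitions_alt (parsed_resume : List (String × String)) (section_ : Option String) : List (String × String) :=
  let d : PySem.Dict String String := PySem.Dict.ofList parsed_resume
  let items := d.items
  let allKeys := items.map (fun kv => kv.1)
  let relevant : List String :=
    match section_ with
    | some s => if s ≠ "" then allKeys.filter (fun k => PySem.Str.startswith k s) else allKeys
    | none => allKeys
  let keyset : PySem.Set String := PySem.Set.ofList relevant
  let st := relevant.foldl (fun (st : PySem.Dict String (List String) × PySem.Set String) k =>
      let v := d.getD k ""
      (List.range k.toList.length).foldl (fun st (i : Nat) =>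
        let p := PySem.Str.slice k none (some (i : Int))
        if keyset.contains p then
          (st.1.modify p [] (fun l => l ++ [v]), PySem.Set.add st.2 k)
        else st) st)
    (PySem.Dict.empty, PySem.Set.empty)
  items.filterMap (fun kv =>
    if st.2.contains kv.1 then none
    else some (kv.1, match st.1.get? kv.1 with
      | some parts => PySem.Str.join "" parts
      | none => kv.2))

-- ===== PRECONDITION & SPEC =====
def Spec_merge_repetitions (parsed_resume : List (String × String)) (section_ : Option String) (out : List (String × String)) : Prop := out = merge_repetitions_alt parsed_resume section_
instance (parsed_resume : List (String × String)) (section_ : Option String) (out : List (String × String)) : Decidable (Spec_merge_repetitions parsed_resume section_ out) := by unfold Spec_merge_repetitions; infer_instance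

-- ===== CLAIM (what is proved, stated in full; the proofs are below) =====
def Claim_equal_merge_repetitions : Prop := ∀ (parsed_resume : List (String × String)) (section_ : Option String), Dom_merge_repetitions parsed_resume section_ → Spec_merge_repetitions parsed_resume section_ (merge_repetitions parsed_resume section_)

-- ===== LEMMAS AND PROOFS =====

-- Shared shapes of both programs, used only by the proofs below.
def pvCond (x : String × String) : Bool := decide (x.1 ≠ x.2) && PySem.Str.startswith x.1 x.2
def pvPairsA (rel : List String) : List (String × String) :=
  rel.flatMap (fun k => rel.map (fun p => (k, p)))
def pvPairsB (rel : List String) : List (String × String) :=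
  rel.flatMap (fun k => (List.range k.toList.length).map (fun (i : Nat) => (k, PySem.Str.slice k none (some (i : Int)))))
def pvPfA (rel : List String) : List (String × String) := (pvPairsA rel).filter pvCond
def pvPfB (rel : List String) : List (String × String) :=
  (pvPairsB rel).filter (fun x => (PySem.Set.ofList rel).contains x.2)
def pvCanon (rel : List String) (q : String) : List (String × String) :=
  if q ∈ rel then (rel.filter (fun k => pvCond (k, q))).map (fun k => (k, q)) else []
def pvRel (parsed_resume : List (String × String)) (section_ : Option String) : List String :=
  let keys := (PySem.Dict.ofList parsed_resume : PySem.Dict String String).keys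
  match section_ with
  | some s => if s ≠ "" then keys.filter (fun k => PySem.Str.startswith k s) else keys
  | none => keys

-- generic fold shapes
theorem pv_foldl_foldl {α β σ : Type} (l : List α) (m : α → List β) (g : σ → α → β → σ) (s : σ) :
    l.foldl (fun s a => (m a).foldl (fun s b => g s a b) s) s
      = (l.flatMap (fun a => (m a).map (fun b => (a, b)))).foldl (fun s ab => g s ab.1 ab.2) s := by
  induction l generalizing s with
  | nil => rfl
  | cons a t ih => simp [List.foldl_append, List.foldl_map, ih]

theorem pv_filterMap_guard {α β : Type} (l : List α) (c : α → Bool) (g : α → β) :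
    l.filterMap (fun x => if c x then none else some (g x))
      = (l.filter (fun x => !c x)).map g := by
  induction l with
  | nil => rfl
  | cons a t ih => by_cases h : c a <;> simp [h, ih]

theorem pv_getD_foldl_modify_appendL {β : Type} (l : List (String × List β))
    (m : PySem.Dict String (List β)) (q : String) :
    (l.foldl (fun m p => m.modify p.1 [] (fun v => v ++ p.2)) m).getD q []
      = m.getD q [] ++ ((l.filter (fun p => p.1 == q)).map (fun p => p.2)).flatten := by
  induction l generalizing m with
  | nil => simp
  | cons a t ih =>
    by_cases h : a.1 = q
    · simp [ih, h]
    · simp [ih, PySem.Dict.getD_modify, h, beq_iff_eq, Ne.symm h]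

theorem pv_items_foldl_erase {ν : Type} (l : List String) (d : PySem.Dict String ν) :
    (l.foldl (fun d k => d.erase k) d).items = d.items.filter (fun p => decide (p.1 ∉ l)) := by
  induction l generalizing d with
  | nil => simp
  | cons a t ih =>
    rw [List.foldl_cons, ih]
    simp only [PySem.Dict.erase, List.filter_filter]
    apply List.filter_congr
    intro x _
    by_cases h1 : x.1 = a <;> by_cases h2 : x.1 ∈ t <;> simp [h1, h2]

theorem pv_get?_foldl_insert_nodup (l : List (String × List Char)) (d : PySem.Dict String String)
    (h : (l.map (fun p => p.1)).Nodup) (q : String) :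
    (l.foldl (fun d kv => d.insert kv.1 (String.ofList kv.2)) d).get? q
      = match l.find? (fun kv => kv.1 == q) with
        | some kv => some (String.ofList kv.2)
        | none => d.get? q := by
  induction l generalizing d with
  | nil => simp
  | cons a t ih =>
    simp only [List.map_cons, List.nodup_cons] at h
    by_cases hq : a.1 = q
    · subst hq
      have hrest : ∀ kv ∈ t, kv.1 ≠ a.1 := by
        intro kv hkv heq
        exact h.1 (heq ▸ List.mem_map_of_mem hkv)
      simp only [List.foldl_cons, ih _ h.2]
      have : t.find? (fun kv => kv.1 == a.1) = none := by
        apply List.find?_eq_none.mpr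
        intro kv hkv
        simp [hrest kv hkv]
      simp [this]
    · simp only [List.foldl_cons, ih _ h.2]
      cases hfind : t.find? (fun kv => kv.1 == q) with
      | some kv => simp [hq, hfind]
      | none => simp [hfind, PySem.Dict.get?_insert, hq, Ne.symm hq]

-- one-element filters over a Nodup list / over range
theorem pv_filter_and_eq (l : List String) (hnd : l.Nodup) (X : String → Bool) (q : String) :
    l.filter (fun p => X p && (p == q)) = if q ∈ l ∧ X q then [q] else [] := by
  induction l with
  | nil => simp
  | cons a t ih =>
    simp only [List.nodup_cons] at hnd
    by_cases h : a = q
    · subst h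
      by_cases hX : X a <;> simp_all
    · have : ¬ (q ∈ [a] ) := by simp [Ne.symm h]
      by_cases hq : q ∈ t <;> by_cases hX : X q <;>
        simp_all

theorem pv_flatMap_if {α β : Type} (l : List α) (c : α → Bool) (g : α → β) :
    l.flatMap (fun a => if c a then [g a] else []) = (l.filter c).map g := by
  induction l with
  | nil => rfl
  | cons a t ih => by_cases h : c a <;> simp [h, ih]

theorem pv_filter_range_unique (n m : Nat) (p : Nat → Bool) :
    (∀ i, i < n → p i = true → i = m) →
      (List.range n).filter p = if m < n ∧ p m = true then [m] else [] := by
  induction n with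
  | zero => intro _; simp
  | succ n ih =>
    intro h
    have ih := ih (fun i hi hip => h i (by omega) hip)
    rw [List.range_succ, List.filter_append]
    by_cases hpn : p n
    · have hmn : n = m := h n (by omega) hpn
      subst hmn
      have hx : ¬ (n < n ∧ p n = true) := by omega
      simp [ih, hpn]
    · have hx : (m < n ∧ p m = true) ↔ (m < n + 1 ∧ p m = true) := by
        constructor
        · rintro ⟨h1, h2⟩; exact ⟨by omega, h2⟩
        · rintro ⟨h1, h2⟩
          refine ⟨?_, h2⟩
          rcases Nat.lt_succ_iff_lt_or_eq.mp h1 with h3 | h3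
          · exact h3
          · exact absurd (h3 ▸ h2) (by simpa using hpn)
      simp only [ih, hx, List.filter_cons, List.filter_nil, hpn]
      simp

-- the prefix bridge: A's pairwise test equals B's prefix probe
theorem pv_slice_take (k : String) (i : Nat) :
    (PySem.Str.slice k none (some (i : Nat))).toList = k.toList.take i := by
  rw [PySem.Str.toList_slice, PySem.Chars.slice_eq_listSlice,
    PySem.List.slice_to _ (by positivity)]
  simp

theorem pv_slice_eq_iff (k q : String) (i : Nat) :
    (PySem.Str.slice k none (some (i : Int)) = q) ↔ (q.toList = k.toList.take i) := by
  rw [← String.toList_inj, pv_slice_take, eq_comm]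

theorem pv_cond_iff (k q : String) :
    pvCond (k, q) = true ↔ q.toList <+: k.toList ∧ q.toList.length < k.toList.length := by
  simp only [pvCond, Bool.and_eq_true, decide_eq_true_eq, PySem.Str.startswith_eq,
    PySem.Chars.startswith_iff]
  constructor
  · rintro ⟨hne, hp⟩
    refine ⟨hp, lt_of_le_of_ne hp.length_le ?_⟩
    intro hlen
    exact hne (String.toList_inj.mp (hp.eq_of_length hlen)).symm
  · rintro ⟨hp, hl⟩
    refine ⟨?_, hp⟩
    intro he
    subst he
    omega

theorem pv_range_filter (k q : String) :
    (List.range k.toList.length).filter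
        (fun (i : Nat) => PySem.Str.slice k none (some (i : Int)) == q)
      = if pvCond (k, q) then [q.toList.length] else [] := by
  rw [pv_filter_range_unique _ q.toList.length _ ?uniq]
  case uniq =>
    intro i hi hip
    have h1 := pv_slice_eq_iff k q i |>.mp (by simpa using hip)
    have h2 : q.toList.length = (k.toList.take i).length := by rw [h1]
    rw [List.length_take] at h2
    omega
  by_cases hc : pvCond (k, q) = true
  · have hx := (pv_cond_iff k q).mp hc
    have hpm : PySem.Str.slice k none (some (q.toList.length : Int)) = q := by
      rw [pv_slice_eq_iff]
      exact List.prefix_iff_eq_take.mp hx.1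
    rw [if_pos ⟨hx.2, by simp only [beq_iff_eq]; exact hpm⟩, if_pos hc]
  · have h4 : ¬ (q.toList.length < k.toList.length ∧
        (PySem.Str.slice k none (some (q.toList.length : Int)) == q) = true) := by
      rintro ⟨h1, h2⟩
      apply hc
      rw [pv_cond_iff]
      have h3 := pv_slice_eq_iff k q q.toList.length |>.mp (by simpa using h2)
      exact ⟨List.prefix_iff_eq_take.mpr h3, h1⟩
    rw [if_neg h4, if_neg hc]

theorem pv_contains_ofList (rel : List String) (q : String) :
    (PySem.Set.ofList rel).contains q = decide (q ∈ rel) := by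
  show List.contains _ _ = _
  rw [List.contains_eq_mem]
  simp [PySem.Set.mem_ofList]

-- the two filtered pair lists agree per target key
theorem pv_pfA_filter (rel : List String) (hnd : rel.Nodup) (q : String) :
    (pvPfA rel).filter (fun x => x.2 == q) = pvCanon rel q := by
  unfold pvPfA pvPairsA pvCanon
  rw [List.filter_filter, List.filter_flatMap]
  have hinner : ∀ k : String, ((rel.map (fun p => (k, p))).filter
        (fun x => (x.2 == q) && pvCond x))
      = if q ∈ rel ∧ pvCond (k, q) then [(k, q)] else [] := by
    intro k
    rw [List.filter_map]
    have hcomp : ((fun x : String × String => (x.2 == q) && pvCond x) ∘ (fun p => (k, p)))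
        = fun p => (pvCond (k, p)) && (p == q) := by
      funext p
      simp [Bool.and_comm]
    rw [hcomp, pv_filter_and_eq rel hnd _ q]
    by_cases h : q ∈ rel ∧ pvCond (k, q) <;> simp [h]
  simp only [hinner]
  by_cases hq : q ∈ rel
  · rw [if_pos hq]
    have hfn : (fun k => if q ∈ rel ∧ pvCond (k, q) then [(k, q)] else [])
        = fun k => if pvCond (k, q) then [(k, q)] else [] := by
      funext k
      by_cases h : pvCond (k, q) <;> simp [h, hq]
    rw [hfn, pv_flatMap_if]
  · simp [hq]

theorem pv_pfB_filter (rel : List String) (q : String) :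
    (pvPfB rel).filter (fun x => x.2 == q) = pvCanon rel q := by
  unfold pvPfB pvPairsB pvCanon
  rw [List.filter_filter, List.filter_flatMap]
  have hinner : ∀ k : String, (((List.range k.toList.length).map
          (fun (i : Nat) => (k, PySem.Str.slice k none (some (i : Int))))).filter
        (fun x => (x.2 == q) && (PySem.Set.ofList rel).contains x.2))
      = if q ∈ rel ∧ pvCond (k, q) then [(k, q)] else [] := by
    intro k
    rw [List.filter_map]
    have hcomp : ((fun x : String × String =>
            (x.2 == q) && (PySem.Set.ofList rel).contains x.2) ∘
          (fun (i : Nat) => (k, PySem.Str.slice k none (some (i : Int)))))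
        = fun (i : Nat) =>
            decide (q ∈ rel) && (PySem.Str.slice k none (some (i : Int)) == q) := by
      funext i
      by_cases he : PySem.Str.slice k none (some (i : Int)) = q
      · simp [Function.comp, he, Bool.and_comm]
      · have hb : (PySem.Str.slice k none (some (i : Int)) == q) = false :=
          beq_eq_false_iff_ne.mpr he
        simp [Function.comp, hb]
    rw [hcomp]
    by_cases hq : q ∈ rel
    · simp only [hq, decide_true, Bool.true_and]
      rw [pv_range_filter]
      by_cases hc : pvCond (k, q)
      · have hpm : PySem.Str.slice k none (some (q.length : Int)) = q := by
          rw [← String.length_toList, pv_slice_eq_iff]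
          exact List.prefix_iff_eq_take.mp ((pv_cond_iff k q).mp hc).1
        simp [hc, hpm]
      · simp [hc]
    · simp [hq]
  simp only [hinner]
  by_cases hq : q ∈ rel
  · rw [if_pos hq]
    have hfn : (fun k => if q ∈ rel ∧ pvCond (k, q) then [(k, q)] else [])
        = fun k => if pvCond (k, q) then [(k, q)] else [] := by
      funext k
      by_cases h : pvCond (k, q) <;> simp [h, hq]
    rw [hfn, pv_flatMap_if]
  · simp [hq]

-- membership of the two "removed" lists
theorem pv_memA1 (rel : List String) (q : String) :
    q ∈ (pvPfA rel).map (fun x => x.1) ↔ q ∈ rel ∧ ∃ p ∈ rel, pvCond (q, p) := by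
  simp only [pvPfA, pvPairsA, List.mem_map, List.mem_filter, List.mem_flatMap]
  constructor
  · rintro ⟨x, ⟨⟨k, hk, p, hp, rfl⟩, hc⟩, rfl⟩
    exact ⟨hk, p, hp, hc⟩
  · rintro ⟨hq, p, hp, hc⟩
    exact ⟨(q, p), ⟨⟨q, hq, p, hp, rfl⟩, hc⟩, rfl⟩

theorem pv_memB1 (rel : List String) (q : String) :
    q ∈ (pvPfB rel).map (fun x => x.1) ↔ q ∈ rel ∧ ∃ p ∈ rel, pvCond (q, p) := by
  simp only [pvPfB, pvPairsB, List.mem_map, List.mem_filter, List.mem_flatMap,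
    List.mem_range]
  constructor
  · rintro ⟨x, ⟨⟨k, hk, i, hi, rfl⟩, hc⟩, rfl⟩
    dsimp only at hc ⊢
    refine ⟨hk, PySem.Str.slice k none (some (i : Int)), ?_, ?_⟩
    · rw [pv_contains_ofList] at hc
      exact of_decide_eq_true hc
    · rw [pv_cond_iff]
      have ht := pv_slice_take k i
      refine ⟨?_, ?_⟩
      · rw [ht]
        exact List.take_prefix i k.toList
      · rw [ht, List.length_take]
        omega
  · rintro ⟨hq, p, hp, hc⟩
    have hx := (pv_cond_iff q p).mp hc
    have he : PySem.Str.slice q none (some (p.toList.length : Int)) = p :=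
      (pv_slice_eq_iff q p p.toList.length).mpr (List.prefix_iff_eq_take.mp hx.1)
    refine ⟨(q, p), ⟨⟨q, hq, p.toList.length, hx.2, by rw [he]⟩, ?_⟩, rfl⟩
    show (PySem.Set.ofList rel).contains _ = true
    rw [pv_contains_ofList]
    exact decide_eq_true hp

-- membership of the two merged dicts' key lists
theorem pv_memA2 (rel : List String) (q : String) :
    q ∈ (pvPfA rel).map (fun x => x.2) ↔ q ∈ rel ∧ ∃ k ∈ rel, pvCond (k, q) := by
  simp only [pvPfA, pvPairsA, List.mem_map, List.mem_filter, List.mem_flatMap]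
  constructor
  · rintro ⟨x, ⟨⟨k, hk, p, hp, rfl⟩, hc⟩, rfl⟩
    exact ⟨hp, k, hk, hc⟩
  · rintro ⟨hq, k, hk, hc⟩
    exact ⟨(k, q), ⟨⟨k, hk, q, hq, rfl⟩, hc⟩, rfl⟩

theorem pv_memB2 (rel : List String) (q : String) :
    q ∈ (pvPfB rel).map (fun x => x.2) ↔ q ∈ rel ∧ ∃ k ∈ rel, pvCond (k, q) := by
  simp only [pvPfB, pvPairsB, List.mem_map, List.mem_filter, List.mem_flatMap,
    List.mem_range]
  constructor
  · rintro ⟨x, ⟨⟨k, hk, i, hi, rfl⟩, hc⟩, rfl⟩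
    dsimp only at hc ⊢
    refine ⟨?_, k, hk, ?_⟩
    · rw [pv_contains_ofList] at hc
      exact of_decide_eq_true hc
    · rw [pv_cond_iff]
      have ht := pv_slice_take k i
      refine ⟨?_, ?_⟩
      · rw [ht]
        exact List.take_prefix i k.toList
      · rw [ht, List.length_take]
        omega
  · rintro ⟨hq, k, hk, hc⟩
    have hx := (pv_cond_iff k q).mp hc
    have he : PySem.Str.slice k none (some (q.toList.length : Int)) = q :=
      (pv_slice_eq_iff k q q.toList.length).mpr (List.prefix_iff_eq_take.mp hx.1)
    refine ⟨(k, q), ⟨⟨k, hk, q.toList.length, hx.2, by rw [he]⟩, ?_⟩, rfl⟩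
    show (PySem.Set.ofList rel).contains _ = true
    rw [pv_contains_ofList]
    exact decide_eq_true hq

-- canonical forms of the two ports
def pvD (parsed_resume : List (String × String)) : PySem.Dict String String :=
  PySem.Dict.ofList parsed_resume
def pvMergedA (parsed_resume : List (String × String)) (section_ : Option String) :
    PySem.Dict String (List Char) :=
  (pvPfA (pvRel parsed_resume section_)).foldl
    (fun m x => m.modify x.2 [] (fun v => v ++ ((pvD parsed_resume).getD x.1 "").toList))
    PySem.Dict.empty
def pvMergedB (parsed_resume : List (String × String)) (section_ : Option String) :
    PySem.Dict String (List String) :=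
  (pvPfB (pvRel parsed_resume section_)).foldl
    (fun m x => m.modify x.2 [] (fun v => v ++ [(pvD parsed_resume).getD x.1 ""]))
    PySem.Dict.empty
def pvOutA (parsed_resume : List (String × String)) (section_ : Option String) :
    List (String × String) :=
  (((pvMergedA parsed_resume section_).items.foldl
      (fun d kv => d.insert kv.1 (String.ofList kv.2)) (pvD parsed_resume)).items).filter
    (fun p => decide (p.1 ∉ (pvPfA (pvRel parsed_resume section_)).map (fun x => x.1)))
def pvOutB (parsed_resume : List (String × String)) (section_ : Option String) :
    List (String × String) :=
  (pvD parsed_resume).items.filterMap (fun kv =>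
    if decide (kv.1 ∈ (pvPfB (pvRel parsed_resume section_)).map (fun x => x.1)) then none
    else some (kv.1, match (pvMergedB parsed_resume section_).get? kv.1 with
      | some parts => PySem.Str.join "" parts
      | none => kv.2))

theorem pv_join_nil (l : List (List Char)) : PySem.Chars.join [] l = l.flatten := by
  show List.intercalate [] l = l.flatten
  simp only [List.intercalate]
  induction l with
  | nil => simp
  | cons x xs ih => cases xs <;> simp_all [List.intersperse]

theorem pv_A_core (d : PySem.Dict String String) (rel : List String) :
    (let st := rel.foldl (fun (st : PySem.Dict String (List Char) × PySem.Set String) key =>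
        rel.foldl (fun st other =>
          if key ≠ other ∧ PySem.Str.startswith key other = true then
            (st.1.modify other [] (fun l => l ++ (d.getD key "").toList),
             PySem.Set.add st.2 key)
          else st) st)
      (PySem.Dict.empty, PySem.Set.empty)
     (st.2.foldl (fun d k => d.erase k)
        (st.1.items.foldl (fun d kv => d.insert kv.1 (String.ofList kv.2)) d)).items)
    = ((((pvPfA rel).foldl
          (fun m x => m.modify x.2 [] (fun v => v ++ (d.getD x.1 "").toList))
          PySem.Dict.empty).items.foldl
            (fun d kv => d.insert kv.1 (String.ofList kv.2)) d).items).filter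
        (fun p => decide (p.1 ∉ (pvPfA rel).map (fun x => x.1))) := by
  dsimp only
  have h1 := pv_foldl_foldl (l := rel) (m := fun _ => rel)
    (g := fun (st : PySem.Dict String (List Char) × PySem.Set String) key other =>
      if key ≠ other ∧ PySem.Str.startswith key other = true then
        (st.1.modify other [] (fun l => l ++ (d.getD key "").toList),
         PySem.Set.add st.2 key)
      else st)
    (s := ((PySem.Dict.empty : PySem.Dict String (List Char)),
      (PySem.Set.empty : PySem.Set String)))
  rw [h1]
  have hstep : (fun (st : PySem.Dict String (List Char) × PySem.Set String)
        (ab : String × String) =>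
        if ab.1 ≠ ab.2 ∧ PySem.Str.startswith ab.1 ab.2 = true then
          (st.1.modify ab.2 [] (fun l => l ++ (d.getD ab.1 "").toList),
           PySem.Set.add st.2 ab.1)
        else st)
      = fun st ab =>
        ((fun (m : PySem.Dict String (List Char)) (ab : String × String) =>
            if pvCond ab = true then
              m.modify ab.2 [] (fun l => l ++ (d.getD ab.1 "").toList) else m) st.1 ab,
         (fun (s : PySem.Set String) (ab : String × String) =>
            if pvCond ab = true then PySem.Set.add s ab.1 else s) st.2 ab) := by
    funext st ab
    by_cases h : ab.1 ≠ ab.2 ∧ PySem.Str.startswith ab.1 ab.2 = true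
    · have hc : pvCond ab = true := by
        simp only [pvCond, Bool.and_eq_true, decide_eq_true_eq]
        exact ⟨h.1, h.2⟩
      rw [if_pos h]
      dsimp only
      rw [if_pos hc, if_pos hc]
    · have hc : ¬ pvCond ab = true := by
        simp only [pvCond, Bool.and_eq_true, decide_eq_true_eq]
        exact h
      rw [if_neg h]
      dsimp only
      rw [if_neg hc, if_neg hc]
  rw [hstep]
  rw [PySem.List.foldl_prod_mk
    (f := fun (m : PySem.Dict String (List Char)) (ab : String × String) =>
      if pvCond ab = true then
        m.modify ab.2 [] (fun l => l ++ (d.getD ab.1 "").toList) else m)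
    (g := fun (s : PySem.Set String) (ab : String × String) =>
      if pvCond ab = true then PySem.Set.add s ab.1 else s)]
  dsimp only
  rw [← List.foldl_filter, ← List.foldl_filter]
  rw [show (PySem.Set.empty : PySem.Set String) = ([] : List String) from rfl]
  rw [← PySem.Set.update_map_eq_foldl_add, PySem.Set.update_nil_left]
  rw [pv_items_foldl_erase]
  show List.filter _ (((pvPfA rel).foldl _ PySem.Dict.empty).items.foldl _ d).items = _
  apply List.filter_congr
  intro x _
  rw [decide_eq_decide]
  exact not_congr ((PySem.Set.mem_ofList _ _).trans Iff.rfl)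

theorem pv_A_eq (parsed_resume : List (String × String)) (section_ : Option String) :
    merge_repetitions parsed_resume section_ = pvOutA parsed_resume section_ := by
  unfold merge_repetitions pvOutA pvMergedA pvD pvRel
  cases section_ with
  | none => exact pv_A_core (PySem.Dict.ofList parsed_resume) _
  | some s => exact pv_A_core (PySem.Dict.ofList parsed_resume) _

theorem pv_B_core (d : PySem.Dict String String) (rel : List String) :
    (let keyset : PySem.Set String := PySem.Set.ofList rel
     let st := rel.foldl (fun (st : PySem.Dict String (List String) × PySem.Set String) k =>
        let v := d.getD k ""
        (List.range k.toList.length).foldl (fun st (i : Nat) =>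
          let p := PySem.Str.slice k none (some (i : Int))
          if keyset.contains p then
            (st.1.modify p [] (fun l => l ++ [v]), PySem.Set.add st.2 k)
          else st) st)
      (PySem.Dict.empty, PySem.Set.empty)
     d.items.filterMap (fun kv =>
       if st.2.contains kv.1 then none
       else some (kv.1, match st.1.get? kv.1 with
         | some parts => PySem.Str.join "" parts
         | none => kv.2)))
    = d.items.filterMap (fun kv =>
        if decide (kv.1 ∈ (pvPfB rel).map (fun x => x.1)) then none
        else some (kv.1, match ((pvPfB rel).foldl
            (fun m x => m.modify x.2 [] (fun v => v ++ [d.getD x.1 ""]))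
            PySem.Dict.empty).get? kv.1 with
          | some parts => PySem.Str.join "" parts
          | none => kv.2)) := by
  dsimp only
  have h1 := pv_foldl_foldl (l := rel) (m := fun k => List.range k.toList.length)
    (g := fun (st : PySem.Dict String (List String) × PySem.Set String) k (i : Nat) =>
      if (PySem.Set.ofList rel).contains (PySem.Str.slice k none (some (i : Int))) then
        (st.1.modify (PySem.Str.slice k none (some (i : Int))) []
          (fun l => l ++ [d.getD k ""]), PySem.Set.add st.2 k)
      else st)
    (s := ((PySem.Dict.empty : PySem.Dict String (List String)),
      (PySem.Set.empty : PySem.Set String)))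
  rw [h1]
  have h2 := List.foldl_map
    (f := fun (ab : String × Nat) => (ab.1, PySem.Str.slice ab.1 none (some (ab.2 : Int))))
    (g := fun (st : PySem.Dict String (List String) × PySem.Set String)
        (x : String × String) =>
      if (PySem.Set.ofList rel).contains x.2 then
        (st.1.modify x.2 [] (fun l => l ++ [d.getD x.1 ""]), PySem.Set.add st.2 x.1)
      else st)
    (l := rel.flatMap (fun k => (List.range k.toList.length).map (fun (i : Nat) => (k, i))))
    (init := ((PySem.Dict.empty : PySem.Dict String (List String)),
      (PySem.Set.empty : PySem.Set String)))
  dsimp only at h2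
  rw [← h2]
  rw [List.map_flatMap]
  have hmm : (fun (k : String) => (((List.range k.toList.length).map
          (fun (i : Nat) => (k, i))).map
        (fun (ab : String × Nat) => (ab.1, PySem.Str.slice ab.1 none (some (ab.2 : Int))))))
      = fun k => (List.range k.toList.length).map
        (fun (i : Nat) => (k, PySem.Str.slice k none (some (i : Int)))) := by
    funext k
    rw [List.map_map]
    rfl
  rw [hmm]
  have hstep : (fun (st : PySem.Dict String (List String) × PySem.Set String)
        (x : String × String) =>
        if (PySem.Set.ofList rel).contains x.2 then
          (st.1.modify x.2 [] (fun l => l ++ [d.getD x.1 ""]), PySem.Set.add st.2 x.1)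
        else st)
      = fun st x =>
        ((fun (m : PySem.Dict String (List String)) (x : String × String) =>
            if (PySem.Set.ofList rel).contains x.2 = true then
              m.modify x.2 [] (fun l => l ++ [d.getD x.1 ""]) else m) st.1 x,
         (fun (s : PySem.Set String) (x : String × String) =>
            if (PySem.Set.ofList rel).contains x.2 = true then
              PySem.Set.add s x.1 else s) st.2 x) := by
    funext st x
    by_cases h : (PySem.Set.ofList rel).contains x.2 = true
    · rw [if_pos h]
      dsimp only
      rw [if_pos h, if_pos h]
    · rw [if_neg h]
      dsimp only
      rw [if_neg h, if_neg h]
  rw [hstep]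
  rw [PySem.List.foldl_prod_mk
    (f := fun (m : PySem.Dict String (List String)) (x : String × String) =>
      if (PySem.Set.ofList rel).contains x.2 = true then
        m.modify x.2 [] (fun l => l ++ [d.getD x.1 ""]) else m)
    (g := fun (s : PySem.Set String) (x : String × String) =>
      if (PySem.Set.ofList rel).contains x.2 = true then PySem.Set.add s x.1 else s)]
  dsimp only
  rw [← List.foldl_filter, ← List.foldl_filter]
  rw [show (PySem.Set.empty : PySem.Set String) = ([] : List String) from rfl]
  rw [← PySem.Set.update_map_eq_foldl_add, PySem.Set.update_nil_left]
  apply List.filterMap_congr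
  intro kv _
  rw [pv_contains_ofList]
  rfl

theorem pv_B_eq (parsed_resume : List (String × String)) (section_ : Option String) :
    merge_repetitions_alt parsed_resume section_ = pvOutB parsed_resume section_ := by
  unfold merge_repetitions_alt pvOutB pvMergedB pvD pvRel
  simp only [PySem.Dict.keys]
  cases section_ with
  | none => exact pv_B_core (PySem.Dict.ofList parsed_resume) _
  | some s => exact pv_B_core (PySem.Dict.ofList parsed_resume) _

theorem pv_relsub (parsed_resume : List (String × String)) (section_ : Option String) :
    ∀ x ∈ pvRel parsed_resume section_, x ∈ (pvD parsed_resume).keys := by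
  unfold pvRel pvD
  cases section_ with
  | none => exact fun x hx => hx
  | some s =>
    dsimp only
    by_cases h : s ≠ ""
    · rw [if_pos h]
      exact fun x hx => (List.mem_filter.mp hx).1
    · rw [if_neg h]
      exact fun x hx => hx

theorem pv_relnd (parsed_resume : List (String × String)) (section_ : Option String) :
    (pvRel parsed_resume section_).Nodup := by
  have hknd : (PySem.Dict.ofList parsed_resume : PySem.Dict String String).keys.Nodup :=
    PySem.Dict.nodup_keys_ofList _
  unfold pvRel
  cases section_ with
  | none => exact hknd
  | some s =>
    dsimp only
    by_cases h : s ≠ ""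
    · rw [if_pos h]
      exact hknd.filter _
    · rw [if_neg h]
      exact hknd

theorem pv_keysA (parsed_resume : List (String × String)) (section_ : Option String) :
    (pvMergedA parsed_resume section_).keys
      = PySem.Set.ofList ((pvPfA (pvRel parsed_resume section_)).map (fun x => x.2)) := by
  unfold pvMergedA
  rw [PySem.Dict.keys_foldl_modify_key
    (key := fun x : String × String => x.2) (d0 := ([] : List Char))
    (f := fun _ x => fun v => v ++ ((pvD parsed_resume).getD x.1 "").toList)]
  rw [show (PySem.Dict.empty : PySem.Dict String (List Char)).keys = ([] : List String)
    from rfl]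
  rw [PySem.Set.update_nil_left]

theorem pv_keysB (parsed_resume : List (String × String)) (section_ : Option String) :
    (pvMergedB parsed_resume section_).keys
      = PySem.Set.ofList ((pvPfB (pvRel parsed_resume section_)).map (fun x => x.2)) := by
  unfold pvMergedB
  rw [PySem.Dict.keys_foldl_modify_key
    (key := fun x : String × String => x.2) (d0 := ([] : List String))
    (f := fun _ x => fun v => v ++ [(pvD parsed_resume).getD x.1 ""])]
  rw [show (PySem.Dict.empty : PySem.Dict String (List String)).keys = ([] : List String)
    from rfl]
  rw [PySem.Set.update_nil_left]

theorem pv_valA (parsed_resume : List (String × String)) (section_ : Option String)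
    (q : String) :
    (pvMergedA parsed_resume section_).getD q []
      = ((pvCanon (pvRel parsed_resume section_) q).map
          (fun x => ((pvD parsed_resume).getD x.1 "").toList)).flatten := by
  unfold pvMergedA
  have h2 := List.foldl_map
    (f := fun x : String × String => (x.2, ((pvD parsed_resume).getD x.1 "").toList))
    (g := fun (m : PySem.Dict String (List Char)) (p : String × List Char) =>
      m.modify p.1 [] (fun v => v ++ p.2))
    (l := pvPfA (pvRel parsed_resume section_))
    (init := (PySem.Dict.empty : PySem.Dict String (List Char)))
  dsimp only at h2
  rw [← h2, pv_getD_foldl_modify_appendL, List.filter_map, List.map_map]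
  simp only [Function.comp_def]
  rw [pv_pfA_filter _ (pv_relnd parsed_resume section_) q]
  simp

theorem pv_valB (parsed_resume : List (String × String)) (section_ : Option String)
    (q : String) :
    (pvMergedB parsed_resume section_).getD q []
      = (pvCanon (pvRel parsed_resume section_) q).map
          (fun x => (pvD parsed_resume).getD x.1 "") := by
  unfold pvMergedB
  have h2 := List.foldl_map
    (f := fun x : String × String => (x.2, (pvD parsed_resume).getD x.1 ""))
    (g := fun (m : PySem.Dict String (List String)) (p : String × String) =>
      m.modify p.1 [] (fun v => v ++ [p.2]))
    (l := pvPfB (pvRel parsed_resume section_))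
    (init := (PySem.Dict.empty : PySem.Dict String (List String)))
  dsimp only at h2
  rw [← h2, PySem.Dict.getD_foldl_modify_append, List.filter_map, List.map_map]
  simp only [Function.comp_def]
  rw [pv_pfB_filter _ q]
  simp

theorem pv_get?_keys {ν : Type} (m : PySem.Dict String ν) (q : String) (d0 : ν) :
    m.get? q = if q ∈ m.keys then some (m.getD q d0) else none := by
  by_cases h : q ∈ m.keys
  · rw [if_pos h]
    cases hg : m.get? q with
    | none => exact absurd ((PySem.Dict.get?_eq_none_iff_not_mem_keys m q).mp hg) (by simp [h])
    | some v => rw [PySem.Dict.getD_eq_get?_getD, hg]; rfl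
  · rw [if_neg h]
    exact (PySem.Dict.get?_eq_none_iff_not_mem_keys m q).mpr h

theorem pv_keysA_nd (parsed_resume : List (String × String)) (section_ : Option String) :
    (pvMergedA parsed_resume section_).keys.Nodup := by
  rw [pv_keysA]
  exact PySem.Set.nodup_ofList _

theorem pv_val_eq (d : PySem.Dict String String) (canon : List (String × String)) :
    String.ofList ((canon.map (fun x => (d.getD x.1 "").toList)).flatten)
      = PySem.Str.join "" (canon.map (fun x => d.getD x.1 "")) := by
  rw [← String.toList_inj, String.toList_ofList, PySem.Str.toList_join,
    show ("" : String).toList = ([] : List Char) from rfl, pv_join_nil, List.map_map]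
  rfl

theorem pv_d2get (parsed_resume : List (String × String)) (section_ : Option String)
    (q : String) :
    ((pvMergedA parsed_resume section_).items.foldl
        (fun d kv => d.insert kv.1 (String.ofList kv.2)) (pvD parsed_resume)).get? q
      = match (pvMergedA parsed_resume section_).get? q with
        | some v => some (String.ofList v)
        | none => (pvD parsed_resume).get? q := by
  rw [pv_get?_foldl_insert_nodup _ _ (pv_keysA_nd parsed_resume section_) q]
  have hdef : (pvMergedA parsed_resume section_).get? q
      = ((pvMergedA parsed_resume section_).items.find? (fun p => p.1 == q)).map
          (fun x => x.2) := rfl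
  rw [hdef]
  cases hf : (pvMergedA parsed_resume section_).items.find? (fun p => p.1 == q) <;>
    simp

theorem pv_d2keys (parsed_resume : List (String × String)) (section_ : Option String) :
    ((pvMergedA parsed_resume section_).items.foldl
        (fun d kv => d.insert kv.1 (String.ofList kv.2)) (pvD parsed_resume)).keys
      = (pvD parsed_resume).keys := by
  rw [PySem.Dict.keys_foldl_insert_key
    (key := fun kv : String × List Char => kv.1)
    (f := fun _ kv => String.ofList kv.2)]
  rw [PySem.Set.update_eq_append_filter]
  have hnil : ((PySem.Set.ofList ((pvMergedA parsed_resume section_).items.map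
        (fun kv => kv.1))).filter
      (fun y => !(PySem.Set.contains (pvD parsed_resume).keys y))) = [] := by
    rw [List.filter_eq_nil_iff]
    intro y hy
    have hy1 : y ∈ (pvMergedA parsed_resume section_).keys :=
      (PySem.Set.mem_ofList _ _).mp hy
    rw [pv_keysA, PySem.Set.mem_ofList, pv_memA2] at hy1
    have hy2 : y ∈ (pvD parsed_resume).keys :=
      pv_relsub parsed_resume section_ y hy1.1
    simp [PySem.Set.contains, List.contains_eq_mem, hy2]
  rw [hnil, List.append_nil]

theorem pv_value_match (parsed_resume : List (String × String)) (section_ : Option String)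
    (q : String) :
    ((pvMergedA parsed_resume section_).items.foldl
        (fun d kv => d.insert kv.1 (String.ofList kv.2)) (pvD parsed_resume)).getD q ""
      = match (pvMergedB parsed_resume section_).get? q with
        | some parts => PySem.Str.join "" parts
        | none => (pvD parsed_resume).getD q "" := by
  rw [PySem.Dict.getD_eq_get?_getD, pv_d2get]
  have hPAB : q ∈ (pvMergedA parsed_resume section_).keys
      ↔ q ∈ (pvMergedB parsed_resume section_).keys := by
    rw [pv_keysA, pv_keysB, PySem.Set.mem_ofList, PySem.Set.mem_ofList,
      pv_memA2, pv_memB2]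
  by_cases hk : q ∈ (pvMergedA parsed_resume section_).keys
  · have hkB : q ∈ (pvMergedB parsed_resume section_).keys := hPAB.mp hk
    rw [pv_get?_keys (pvMergedA parsed_resume section_) q [], if_pos hk,
      pv_get?_keys (pvMergedB parsed_resume section_) q [], if_pos hkB]
    dsimp only
    rw [pv_valA, pv_valB, pv_val_eq]
    rfl
  · have hkB : q ∉ (pvMergedB parsed_resume section_).keys := fun h => hk (hPAB.mpr h)
    rw [pv_get?_keys (pvMergedA parsed_resume section_) q [], if_neg hk,
      pv_get?_keys (pvMergedB parsed_resume section_) q [], if_neg hkB]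
    dsimp only
    rw [PySem.Dict.getD_eq_get?_getD]

theorem pv_main (parsed_resume : List (String × String)) (section_ : Option String) :
    pvOutA parsed_resume section_ = pvOutB parsed_resume section_ := by
  unfold pvOutA pvOutB
  have hknd : (pvD parsed_resume).keys.Nodup := PySem.Dict.nodup_keys_ofList _
  rw [PySem.Dict.items_eq_map_keys _ ((pv_d2keys parsed_resume section_).symm ▸ hknd) "",
    pv_d2keys parsed_resume section_]
  rw [PySem.Dict.items_eq_map_keys (pvD parsed_resume) hknd ""]
  rw [List.filter_map, List.filterMap_map]
  simp only [Function.comp_def]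
  rw [pv_filterMap_guard _
    (fun k => decide (k ∈ (pvPfB (pvRel parsed_resume section_)).map (fun x => x.1)))
    (fun k => ((k, (match (pvMergedB parsed_resume section_).get? k with
      | some parts => PySem.Str.join "" parts
      | none => (pvD parsed_resume).getD k "" : String)) : String × String))]
  have hfilters : (pvD parsed_resume).keys.filter
        (fun k => decide (k ∉ (pvPfA (pvRel parsed_resume section_)).map (fun x => x.1)))
      = (pvD parsed_resume).keys.filter
        (fun k => !decide (k ∈ (pvPfB (pvRel parsed_resume section_)).map (fun x => x.1))) := by
    apply List.filter_congr
    intro k _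
    rw [decide_not]
    have hiff : k ∈ (pvPfA (pvRel parsed_resume section_)).map (fun x => x.1)
        ↔ k ∈ (pvPfB (pvRel parsed_resume section_)).map (fun x => x.1) := by
      rw [pv_memA1, pv_memB1]
    rw [decide_eq_decide.mpr hiff]
  rw [hfilters]
  apply List.map_congr_left
  intro k _
  rw [Prod.mk.injEq]
  exact ⟨rfl, pv_value_match parsed_resume section_ k⟩

-- ===== VERDICT (by name: the statement is the Claim_ definition above) =====
theorem merge_repetitions_spec : Claim_equal_merge_repetitions := by
  intro parsed_resume section_ _
  unfold Spec_merge_repetitions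
  rw [pv_A_eq, pv_B_eq, pv_main]
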